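-- pv_equiv track=rewrite | github.com/glennputra04/smartverse | smartverse-be/main.py | filter_irrelevant_slides
-- ===== SOURCE A (Python) =====
-- def is_closing_slide(text):
--
--     text_lower = text.lower()
--
--     keywords = [
--         "thank you",
--         "thanks",
--         "terima kasih",
--         "questions",
--         "q&a",
--         "any questions"
--     ]
--
--     for k in keywords:
--         if k in text_lower:
--             return True
--
--     return False
--
-- def is_reference_slide(text):
--
--     text_lower = text.lower()
--
--     # banyak ISBN
--     if text_lower.count("isbn") >= 3:
--         return True
--
--     return False
--
-- def filter_irrelevant_slides(slides):
--
--     total = len(slides)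
--
--     filtered = []
--
--     for i, slide in enumerate(slides):
--
--         text = slide["content"]
--
--         if i == 0 : continue
--
--         # cek 3 halaman terakhir
--         if i >= total - 3:
--             if is_reference_slide(text) or is_closing_slide(text):
--                 continue
--
--         filtered.append(slide)
--
--     return filtered
-- ===== SOURCE B (Python) =====
-- def is_closing_slide(text):
--     text_lower = text.lower()
--     keywords = [
--         "thank you",
--         "thanks",
--         "terima kasih",
--         "questions",
--         "q&a",
--         "any questions"
--     ]
--     for k in keywords:
--         if k in text_lower:
--             return True
--     return False
--
-- def is_reference_slide(text):
--     text_lower = text.lower()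
--     if text_lower.count("isbn") >= 3:
--         return True
--     return False
--
-- def filter_irrelevant_slides(slides):
--     # Build the result BACK-TO-FRONT: walk the non-first slides from the end
--     # with a countdown budget of 3 "filterable" positions, then reverse.
--     kept = []
--     budget = 3
--     for s in reversed(slides[1:]):
--         if budget:
--             budget -= 1
--             if is_reference_slide(s["content"]) or is_closing_slide(s["content"]):
--                 continue
--         kept.append(s)
--     kept.reverse()
--     return kept
-- ===== Notes on version B (the rewrite author's own statement) =====
-- stated objective: alternative
-- what changed: Builds the result back-to-front: a reversed traversal of the non-first slides with a countdown budget of 3 filterable positions (so no index arithmetic against len is needed per element), then one final reverse; A walks forward with enumerate and positional guards i==0 and i>=total-3.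
import Mathlib
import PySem

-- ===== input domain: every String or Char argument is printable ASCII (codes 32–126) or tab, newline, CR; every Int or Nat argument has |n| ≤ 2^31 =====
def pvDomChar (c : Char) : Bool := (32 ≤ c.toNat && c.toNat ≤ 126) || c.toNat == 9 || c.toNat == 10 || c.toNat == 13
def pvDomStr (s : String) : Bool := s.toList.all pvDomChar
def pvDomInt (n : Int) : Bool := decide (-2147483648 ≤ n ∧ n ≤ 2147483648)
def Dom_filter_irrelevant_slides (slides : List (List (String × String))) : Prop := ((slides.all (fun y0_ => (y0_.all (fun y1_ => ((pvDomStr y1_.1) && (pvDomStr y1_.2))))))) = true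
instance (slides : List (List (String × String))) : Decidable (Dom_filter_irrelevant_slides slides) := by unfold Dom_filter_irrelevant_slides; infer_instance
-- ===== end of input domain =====

-- B builds the result back-to-front: a reversed traversal of the non-first slides with a
-- countdown budget of 3 filterable positions, then one final reverse; same value, same cost
-- (objective: alternative decomposition).

-- ===== PORT A =====
-- shared helper: is_closing_slide (the loop with early return is the List.any of the keywords)
def pyIsClosingSlide (text : String) : Bool :=
  let textLower := PySem.Str.lower text
  [ "thank you", "thanks", "terima kasih", "questions", "q&a", "any questions"
  ].any (fun k => PySem.Str.isIn k textLower)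

-- shared helper: is_reference_slide
def pyIsReferenceSlide (text : String) : Bool :=
  let textLower := PySem.Str.lower text
  decide (3 ≤ PySem.Str.count textLower "isbn")

-- slide["content"]; a missing key is a KeyError (excluded by Pre_), default "" is never read inside Pre_
def pyContent (slide : List (String × String)) : String :=
  (PySem.Dict.get? (⟨slide⟩ : PySem.Dict String String) "content").getD ""

def filter_irrelevant_slides (slides : List (List (String × String))) : List (List (String × String)) :=
  let total : Int := slides.length
  (PySem.List.enumerate slides 0).foldl
    (fun filtered p =>
      if p.1 == 0 then filtered
      else if total - 3 ≤ p.1 then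
        if pyIsReferenceSlide (pyContent p.2) || pyIsClosingSlide (pyContent p.2) then filtered
        else filtered ++ [p.2]
      else filtered ++ [p.2])
    []

-- ===== PORT B =====
-- reversed(slides[1:]) with state (kept, budget); 'if budget:' is budget ≠ 0; kept.reverse() at the end
def filter_irrelevant_slides_alt (slides : List (List (String × String))) : List (List (String × String)) :=
  let r :=
    (PySem.List.slice slides (some 1) none).reverse.foldl
      (fun (st : List (List (String × String)) × Int) s =>
        if st.2 ≠ 0 then
          if pyIsReferenceSlide (pyContent s) || pyIsClosingSlide (pyContent s) then
            (st.1, st.2 - 1)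
          else (st.1 ++ [s], st.2 - 1)
        else (st.1 ++ [s], st.2))
      ([], 3)
  r.1.reverse

-- ===== PRECONDITION & SPEC =====
-- Pre_ excludes exactly the inputs where A raises KeyError: a slide without a "content" key.
def Pre_filter_irrelevant_slides (slides : List (List (String × String))) : Prop :=
  ∀ slide ∈ slides, (PySem.Dict.get? (⟨slide⟩ : PySem.Dict String String) "content").isSome

instance (slides : List (List (String × String))) : Decidable (Pre_filter_irrelevant_slides slides) := by
  unfold Pre_filter_irrelevant_slides; infer_instance

def pvWitness_filter_irrelevant_slides : (List (List (String × String))) :=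
  [[("content", "intro")], [("content", "body isbn")], [("content", "thank you")]]

def Spec_filter_irrelevant_slides (slides : List (List (String × String))) (out : List (List (String × String))) : Prop := out = filter_irrelevant_slides_alt slides
instance (slides : List (List (String × String))) (out : List (List (String × String))) : Decidable (Spec_filter_irrelevant_slides slides out) := by unfold Spec_filter_irrelevant_slides; infer_instance

-- ===== CLAIM (what is proved, stated in full; the proofs are below) =====
def Claim_equal_filter_irrelevant_slides : Prop := ∀ (slides : List (List (String × String))), Dom_filter_irrelevant_slides slides → Pre_filter_irrelevant_slides slides → Spec_filter_irrelevant_slides slides (filter_irrelevant_slides slides)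

-- ===== LEMMAS AND PROOFS =====

-- the per-slide relevance test shared by both loop bodies
def pvBad (s : List (String × String)) : Bool :=
  pyIsReferenceSlide (pyContent s) || pyIsClosingSlide (pyContent s)

-- A's loop over the tail starting at index s ≥ 1: indices below c are kept, indices ≥ c are filtered
theorem pvLoop (c : Int) (ys : List (List (String × String))) :
    ∀ (s : Int) (acc : List (List (String × String))), 1 ≤ s →
    (PySem.List.enumerate ys s).foldl
      (fun filtered p =>
        if p.1 == 0 then filtered
        else if c ≤ p.1 then
          if pyIsReferenceSlide (pyContent p.2) || pyIsClosingSlide (pyContent p.2) then filtered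
          else filtered ++ [p.2]
        else filtered ++ [p.2]) acc
      = acc ++ ys.take (c - s).toNat ++ (ys.drop (c - s).toNat).filter (fun s => !pvBad s) := by
  induction ys with
  | nil => intro s acc _; simp [PySem.List.enumerate_nil]
  | cons a t ih =>
    intro s acc hs
    rw [PySem.List.enumerate_cons, List.foldl_cons]
    have hs0 : (s == 0) = false := by simp; omega
    by_cases hc : c ≤ s
    · have h0 : (c - s).toNat = 0 := by omega
      have h1 : (c - (s + 1)).toNat = 0 := by omega
      simp only [hs0, Bool.false_eq_true, if_false, if_pos hc]
      by_cases hb : (pyIsReferenceSlide (pyContent a) || pyIsClosingSlide (pyContent a)) = true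
      · rw [if_pos hb, ih (s + 1) acc (by omega), h0, h1]
        have hba : pvBad a = true := hb
        simp [hba]
      · rw [if_neg hb, ih (s + 1) (acc ++ [a]) (by omega), h0, h1]
        have hba : pvBad a = false := by simpa [pvBad] using hb
        simp [hba]
    · have hlt : s < c := by omega
      have h2 : (c - s).toNat = (c - (s + 1)).toNat + 1 := by omega
      rw [if_neg (by simp [hs0]), if_neg hc, ih (s + 1) (acc ++ [a]) (by omega), h2]
      simp [List.take_succ_cons, List.drop_succ_cons]

-- B's loop over a list l with budget b ≥ 0: the first b elements are filtered, the rest all kept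
theorem pvLoopB (l : List (List (String × String))) :
    ∀ (acc : List (List (String × String))) (b : Int), 0 ≤ b →
    (l.foldl
      (fun (st : List (List (String × String)) × Int) s =>
        if st.2 ≠ 0 then
          if pyIsReferenceSlide (pyContent s) || pyIsClosingSlide (pyContent s) then
            (st.1, st.2 - 1)
          else (st.1 ++ [s], st.2 - 1)
        else (st.1 ++ [s], st.2))
      (acc, b)).1
      = acc ++ (l.take b.toNat).filter (fun s => !pvBad s) ++ l.drop b.toNat := by
  induction l with
  | nil => intro acc b _; simp
  | cons a t ih =>
    intro acc b hb
    rw [List.foldl_cons]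
    by_cases hz : b = 0
    · subst hz
      simp only [ne_eq, not_true_eq_false, if_false]
      rw [ih (acc ++ [a]) 0 le_rfl]
      simp
    · have h1 : 1 ≤ b := by omega
      have ht : b.toNat = (b - 1).toNat + 1 := by omega
      simp only [ne_eq, hz, not_false_eq_true, if_true]
      by_cases hbad : (pyIsReferenceSlide (pyContent a) || pyIsClosingSlide (pyContent a)) = true
      · rw [if_pos hbad, ih acc (b - 1) (by omega), ht]
        have hba : pvBad a = true := hbad
        simp [hba]
      · rw [if_neg hbad, ih (acc ++ [a]) (b - 1) (by omega), ht]
        have hba : pvBad a = false := by simpa [pvBad] using hbad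
        simp [hba]

theorem pvMain (slides : List (List (String × String))) :
    filter_irrelevant_slides slides = filter_irrelevant_slides_alt slides := by
  unfold filter_irrelevant_slides filter_irrelevant_slides_alt
  cases slides with
  | nil => simp [PySem.List.enumerate_nil, PySem.List.slice]
  | cons h t =>
    rw [PySem.List.enumerate_cons, List.foldl_cons]
    simp only [BEq.rfl, if_pos]
    have h01 : (0 : Int) + 1 = 1 := by norm_num
    rw [h01]
    set total : Int := ((h :: t).length : Int) with htot
    rw [pvLoop (total - 3) t 1 [] le_rfl]
    rw [PySem.List.slice_from_one]
    show _ = ((t.reverse.foldl _ ([], 3)).1).reverse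
    rw [pvLoopB t.reverse [] 3 (by norm_num)]
    have h3 : (3 : Int).toNat = 3 := rfl
    rw [h3]
    have hk : (total - 3 - 1).toNat = t.length - 3 := by
      simp only [htot, List.length_cons]; omega
    rw [hk]
    rw [List.take_reverse, List.drop_reverse, List.filter_reverse]
    simp

-- ===== VERDICT (by name: the statement is the Claim_ definition above) =====
theorem filter_irrelevant_slides_spec : Claim_equal_filter_irrelevant_slides := by
  intro slides _ _
  unfold Spec_filter_irrelevant_slides
  exact pvMain slides
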